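-- pv_equiv track=rewrite | github.com/4Llover/Automation_PMEML | LJT_Automation_Suite.py | match_sample
-- ===== SOURCE A (Python) =====
-- def match_sample(name, flist):
--     su = str(name).upper().strip()
--     for fn, fp in flist:
--         if fn.upper() == su: return (fn, fp)
--     for fn, fp in flist:
--         if fn.upper().startswith(su): return (fn, fp)
--     for fn, fp in flist:
--         if su.startswith(fn.upper()): return (fn, fp)
--     return None
-- ===== SOURCE B (Python) =====
-- def match_sample(name, flist):
--     su = str(name).upper().strip()
--     first_prefix = None
--     first_reverse = None
--     for fn, fp in flist:
--         u = fn.upper()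
--         if u == su:
--             return (fn, fp)
--         elif u.startswith(su) and first_prefix is None:
--             first_prefix = (fn, fp)
--         elif su.startswith(u) and first_reverse is None:
--             first_reverse = (fn, fp)
--     return first_prefix if first_prefix is not None else first_reverse
-- ===== Notes on version B (the rewrite author's own statement) =====
-- stated objective: alternative
-- what changed: Replaces A's three sequential full scans of flist by a single pass that returns an exact match immediately and records the first prefix and first reverse-prefix candidates in two slots.
import Mathlib
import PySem

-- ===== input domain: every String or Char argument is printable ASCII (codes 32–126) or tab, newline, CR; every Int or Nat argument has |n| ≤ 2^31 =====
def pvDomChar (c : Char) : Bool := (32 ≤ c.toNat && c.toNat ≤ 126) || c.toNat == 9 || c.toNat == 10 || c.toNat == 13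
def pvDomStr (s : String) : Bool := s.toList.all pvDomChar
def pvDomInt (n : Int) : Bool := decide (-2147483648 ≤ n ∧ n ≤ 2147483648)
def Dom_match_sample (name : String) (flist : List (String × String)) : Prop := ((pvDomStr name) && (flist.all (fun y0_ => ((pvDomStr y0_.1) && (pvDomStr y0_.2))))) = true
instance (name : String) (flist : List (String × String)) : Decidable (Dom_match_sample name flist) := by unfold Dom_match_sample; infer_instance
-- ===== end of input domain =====

-- B replaces A's three sequential scans by one pass with two candidate slots (same return value; objective: alternative decomposition).

-- ===== PORT A =====
-- loop 1: for fn, fp in flist: if fn.upper() == su: return (fn, fp)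
def scanExact (su : String) : List (String × String) → Option (String × String)
  | [] => none
  | (fn, fp) :: t => if PySem.Str.upper fn = su then some (fn, fp) else scanExact su t

-- loop 2: for fn, fp in flist: if fn.upper().startswith(su): return (fn, fp)
def scanPrefix (su : String) : List (String × String) → Option (String × String)
  | [] => none
  | (fn, fp) :: t =>
      if PySem.Str.startswith (PySem.Str.upper fn) su then some (fn, fp) else scanPrefix su t

-- loop 3: for fn, fp in flist: if su.startswith(fn.upper()): return (fn, fp)
def scanReverse (su : String) : List (String × String) → Option (String × String)
  | [] => none
  | (fn, fp) :: t =>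
      if PySem.Str.startswith su (PySem.Str.upper fn) then some (fn, fp) else scanReverse su t

def match_sample (name : String) (flist : List (String × String)) : Option (String × String) :=
  let su := PySem.Str.strip (PySem.Str.upper name)
  match scanExact su flist with
  | some r => some r
  | none =>
    match scanPrefix su flist with
    | some r => some r
    | none => scanReverse su flist

-- ===== PORT B =====
-- single pass: return on exact match; record first prefix / first reverse-prefix candidates
def loopB (su : String) : List (String × String) → Option (String × String) → Option (String × String) → Option (String × String)
  | [], p, r => match p with | some x => some x | none => r
  | (fn, fp) :: t, p, r =>
      let u := PySem.Str.upper fn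
      if u = su then some (fn, fp)
      else if PySem.Str.startswith u su && p.isNone then loopB su t (some (fn, fp)) r
      else if PySem.Str.startswith su u && r.isNone then loopB su t p (some (fn, fp))
      else loopB su t p r

def match_sample_alt (name : String) (flist : List (String × String)) : Option (String × String) :=
  let su := PySem.Str.strip (PySem.Str.upper name)
  loopB su flist none none

-- ===== PRECONDITION & SPEC =====
def Spec_match_sample (name : String) (flist : List (String × String)) (out : Option (String × String)) : Prop := out = match_sample_alt name flist
instance (name : String) (flist : List (String × String)) (out : Option (String × String)) : Decidable (Spec_match_sample name flist out) := by unfold Spec_match_sample; infer_instance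

-- ===== CLAIM (what is proved, stated in full; the proofs are below) =====
def Claim_equal_match_sample : Prop := ∀ (name : String) (flist : List (String × String)), Dom_match_sample name flist → Spec_match_sample name flist (match_sample name flist)

-- ===== LEMMAS AND PROOFS =====

-- first element that is a strict prefix candidate (B's second branch: prefix and not exact)
def scanPrefix' (su : String) : List (String × String) → Option (String × String)
  | [] => none
  | (fn, fp) :: t =>
      if PySem.Str.startswith (PySem.Str.upper fn) su ∧ PySem.Str.upper fn ≠ su
      then some (fn, fp) else scanPrefix' su t

-- first element that is a reverse-prefix-only candidate (B's third branch)
def scanReverse' (su : String) : List (String × String) → Option (String × String)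
  | [] => none
  | (fn, fp) :: t =>
      if PySem.Str.startswith su (PySem.Str.upper fn) ∧ ¬ PySem.Str.startswith (PySem.Str.upper fn) su
      then some (fn, fp) else scanReverse' su t


def oGet (a b : Option (String × String)) : Option (String × String) :=
  match a with | some x => some x | none => b

theorem pv_toList_inj (s t : String) (h : s.toList = t.toList) : s = t :=
  String.toList_inj.mp h

theorem pv_sw_antisymm (a b : List Char)
    (h1 : PySem.Chars.startswith a b = true) (h2 : PySem.Chars.startswith b a = true) : a = b := by
  rw [PySem.Chars.startswith_iff] at h1 h2
  exact h2.eq_of_length (h2.length_le.antisymm h1.length_le)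

theorem pv_both_eq (fn su : String)
    (hp : PySem.Chars.startswith (PySem.Chars.upper fn.toList) su.toList = true)
    (hr : PySem.Chars.startswith su.toList (PySem.Chars.upper fn.toList) = true) :
    PySem.Str.upper fn = su :=
  pv_toList_inj _ _ (by simpa using pv_sw_antisymm _ _ hp hr)

theorem loopB_eq (su : String) (l : List (String × String))
    (p r : Option (String × String)) :
    loopB su l p r =
      oGet (scanExact su l) (oGet (oGet p (scanPrefix' su l)) (oGet r (scanReverse' su l))) := by
  induction l generalizing p r with
  | nil => cases p <;> cases r <;> simp [loopB, scanExact, scanPrefix', scanReverse', oGet]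
  | cons hd t ih =>
    obtain ⟨fn, fp⟩ := hd
    by_cases he : PySem.Str.upper fn = su
    · simp [loopB, scanExact, oGet, he]
    · by_cases hp : PySem.Chars.startswith (PySem.Chars.upper fn.toList) su.toList = true
      · by_cases hr : PySem.Chars.startswith su.toList (PySem.Chars.upper fn.toList) = true
        · exact absurd (pv_both_eq fn su hp hr) he
        · cases p <;>
            simp [loopB, scanExact, scanPrefix', he, hp, hr, ih, oGet]
      · by_cases hr : PySem.Chars.startswith su.toList (PySem.Chars.upper fn.toList) = true
        · cases r <;>
            simp [loopB, scanExact, scanPrefix', scanReverse', he, hp, hr, ih, oGet]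
        · simp [loopB, scanExact, scanPrefix', scanReverse', he, hp, hr, ih, oGet]

theorem scanPrefix_eq (su : String) (l : List (String × String))
    (h : scanExact su l = none) : scanPrefix su l = scanPrefix' su l := by
  induction l with
  | nil => rfl
  | cons hd t ih =>
    obtain ⟨fn, fp⟩ := hd
    simp only [scanExact] at h
    by_cases he : PySem.Str.upper fn = su
    · simp [he] at h
    · rw [if_neg he] at h
      by_cases hp : PySem.Chars.startswith (PySem.Chars.upper fn.toList) su.toList = true
      · simp [scanPrefix, scanPrefix', hp, he]
      · simp [scanPrefix, scanPrefix', hp, ih h]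

theorem scanReverse_eq (su : String) (l : List (String × String))
    (h : scanPrefix su l = none) : scanReverse su l = scanReverse' su l := by
  induction l with
  | nil => rfl
  | cons hd t ih =>
    obtain ⟨fn, fp⟩ := hd
    simp only [scanPrefix, PySem.Str.startswith_eq, PySem.Str.toList_upper] at h
    by_cases hp : PySem.Chars.startswith (PySem.Chars.upper fn.toList) su.toList = true
    · simp [hp] at h
    · rw [if_neg hp] at h
      by_cases hr : PySem.Chars.startswith su.toList (PySem.Chars.upper fn.toList) = true
      · simp [scanReverse, scanReverse', hr, hp]
      · simp [scanReverse, scanReverse', hr, ih h]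

theorem pv_main (su : String) (l : List (String × String)) :
    (match scanExact su l with
     | some r => some r
     | none =>
       match scanPrefix su l with
       | some r => some r
       | none => scanReverse su l) =
      oGet (scanExact su l) (oGet (oGet none (scanPrefix' su l)) (oGet none (scanReverse' su l))) := by
  cases h1 : scanExact su l with
  | some x => rfl
  | none =>
    rw [← scanPrefix_eq su l h1]
    cases h2 : scanPrefix su l with
    | some x => rfl
    | none => simp [oGet, ← scanReverse_eq su l h2]

-- ===== VERDICT (by name: the statement is the Claim_ definition above) =====
theorem match_sample_spec : Claim_equal_match_sample := by
  intro name flist _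
  show match_sample name flist = match_sample_alt name flist
  unfold match_sample match_sample_alt
  rw [loopB_eq]
  exact pv_main _ flist
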